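-- pv_equiv track=rewrite | github.com/Judongsung/algorithm | 백준/Gold/9935. 문자열 폭발/문자열 폭발.py | explode_text
-- ===== SOURCE A (Python) =====
-- EMPTY = 'FRULA'
--
-- def explode_text(text: str, bomb: str) -> str:
--     cur = 0
--     stack = []
--     bomb_to_list = list(bomb)
--     bomb_len = len(bomb)
--
--     while cur < len(text):
--         stack.append(text[cur])
--         cur += 1
--         while len(stack) >= bomb_len and stack[-bomb_len:] == bomb_to_list:
--             for _ in range(bomb_len):
--                 stack.pop()
--
--     if not stack:
--         return EMPTY
--     return ''.join(stack)
-- ===== SOURCE B (Python) =====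
-- EMPTY = 'FRULA'
--
-- def explode_text(text: str, bomb: str) -> str:
--     # Repeatedly splice out the leftmost occurrence of bomb from the whole
--     # string until none remains (no stack; whole-string find + slicing).
--     s = text
--     if bomb:
--         m = len(bomb)
--         i = s.find(bomb)
--         while i != -1:
--             s = s[:i] + s[i + m:]
--             i = s.find(bomb)
--     return s if s else EMPTY
-- ===== Notes on version B (the rewrite author's own statement) =====
-- stated objective: simpler
-- what changed: A scans character-by-character maintaining an explicit stack and compares its last len(bomb) elements after every push; B has no stack: it repeatedly finds the leftmost occurrence of bomb in the whole string and splices it out until none remains, doing the scanning in C-level str.find/slicing instead of a per-character Python loop.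
import Mathlib
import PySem

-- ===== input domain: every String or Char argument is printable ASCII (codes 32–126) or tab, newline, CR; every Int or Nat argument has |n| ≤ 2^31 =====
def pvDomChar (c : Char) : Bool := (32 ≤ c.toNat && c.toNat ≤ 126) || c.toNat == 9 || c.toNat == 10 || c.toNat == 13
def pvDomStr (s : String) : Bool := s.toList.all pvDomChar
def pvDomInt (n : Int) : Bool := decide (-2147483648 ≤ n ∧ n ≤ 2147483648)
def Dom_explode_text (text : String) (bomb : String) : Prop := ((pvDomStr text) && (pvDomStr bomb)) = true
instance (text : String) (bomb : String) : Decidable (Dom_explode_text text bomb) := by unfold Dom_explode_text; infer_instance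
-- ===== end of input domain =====

-- B replaces A's char-by-char stack (suffix check after every push) by repeatedly
-- splicing out the leftmost occurrence of bomb from the whole string; alternative
-- decomposition, proved to return the same string on every input.

-- ===== PORT A =====
-- inner `while len(stack) >= bomb_len and stack[-bomb_len:] == bomb_to_list`:
-- fuel only makes the loop total (each executed body pops bomb_len ≥ 1 chars in
-- every reachable state; the caller passes fuel = len(stack) + 1, always enough).
def explodeInner (bombL : List Char) (bombLen : Nat) : Nat → List Char → List Char
  | 0, st => st
  | fuel + 1, st =>
      if bombLen ≤ st.length ∧ PySem.List.slice st (some (-(bombLen : Int))) none = bombL then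
        -- `for _ in range(bomb_len): stack.pop()`
        explodeInner bombL bombLen fuel ((List.range bombLen).foldl (fun s _ => s.dropLast) st)
      else st

-- outer `while cur < len(text): stack.append(text[cur]); cur += 1; <inner>`
def explodeOuter (bombL : List Char) (bombLen : Nat) : List Char → List Char → List Char
  | [], st => st
  | c :: rest, st =>
      explodeOuter bombL bombLen rest (explodeInner bombL bombLen ((st ++ [c]).length + 1) (st ++ [c]))

def explode_text (text : String) (bomb : String) : String :=
  let bombL := bomb.toList            -- bomb_to_list = list(bomb); bomb_len = len(bomb)
  let st := explodeOuter bombL bombL.length text.toList []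
  if st = [] then "FRULA" else String.ofList st   -- EMPTY = 'FRULA'; ''.join(stack)

-- ===== PORT B =====
-- `i = s.find(bomb); while i != -1: s = s[:i] + s[i+m:]; i = s.find(bomb)`
-- fuel only makes the loop total (each body shrinks s by len(bomb) ≥ 1 chars;
-- the caller passes fuel = len(text) + 1, always enough).
def explodeFind (bombL : List Char) : Nat → List Char → List Char
  | 0, s => s
  | fuel + 1, s =>
      let i := PySem.Chars.find s bombL
      if i = -1 then s
      else explodeFind bombL fuel
        (PySem.List.slice s none (some i) ++ PySem.List.slice s (some (i + (bombL.length : Int))) none)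

def explode_text_alt (text : String) (bomb : String) : String :=
  let bombL := bomb.toList
  let s := if bombL = [] then text.toList                 -- `if bomb:` guard
           else explodeFind bombL (text.toList.length + 1) text.toList
  if s = [] then "FRULA" else String.ofList s                 -- `return s if s else EMPTY`

-- ===== PRECONDITION & SPEC =====
def Spec_explode_text (text : String) (bomb : String) (out : String) : Prop := out = explode_text_alt text bomb
instance (text : String) (bomb : String) (out : String) : Decidable (Spec_explode_text text bomb out) := by unfold Spec_explode_text; infer_instance

-- ===== CLAIM (what is proved, stated in full; the proofs are below) =====
def Claim_equal_explode_text : Prop := ∀ (text : String) (bomb : String), Dom_explode_text text bomb → Spec_explode_text text bomb (explode_text text bomb)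

-- ===== LEMMAS AND PROOFS =====

-- `for _ in range(k): stack.pop()` keeps the first (length - k) elements
theorem pops_eq_take (k : Nat) (st : List Char) :
    (List.range k).foldl (fun s _ => s.dropLast) st = st.take (st.length - k) := by
  induction k with
  | zero => simp
  | succ k ih =>
      rw [List.range_succ, List.foldl_append, ih]
      simp only [List.foldl_cons, List.foldl_nil, List.dropLast_eq_take, List.length_take]
      rw [List.take_take]
      congr 1
      omega

-- A's inner-loop condition is exactly "bombL is a suffix of the stack" (bombL ≠ [])
theorem cond_iff_suffix (bombL st : List Char) (hb : bombL ≠ []) :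
    (bombL.length ≤ st.length ∧ PySem.List.slice st (some (-(bombL.length : Int))) none = bombL)
      ↔ bombL <:+ st := by
  rw [PySem.List.slice_from_neg_natCast st bombL.length (by simpa [List.length_pos_iff] using hb)]
  constructor
  · rintro ⟨hle, hdrop⟩
    exact List.suffix_iff_eq_drop.mpr hdrop.symm
  · intro hs
    exact ⟨hs.length_le, (List.suffix_iff_eq_drop.mp hs).symm⟩

-- one execution of the inner loop when the freshly popped stack is bomb-free
theorem inner_eq (bombL : List Char) (hb : bombL ≠ []) (fuel : Nat) (st : List Char)
    (hf : 1 ≤ fuel)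
    (hfree : ¬ bombL <:+: st.take (st.length - bombL.length)) :
    explodeInner bombL bombL.length fuel st =
      if bombL <:+ st then st.take (st.length - bombL.length) else st := by
  obtain ⟨g, rfl⟩ : ∃ g, fuel = g + 1 := ⟨fuel - 1, by omega⟩
  rw [explodeInner]
  by_cases hs : bombL <:+ st
  · rw [if_pos ((cond_iff_suffix bombL st hb).mpr hs), if_pos hs, pops_eq_take]
    cases g with
    | zero => rfl
    | succ g' =>
        rw [explodeInner, if_neg]
        intro hc
        exact hfree ((cond_iff_suffix bombL _ hb).mp hc).isInfix
  · rw [if_neg (fun hc => hs ((cond_iff_suffix bombL st hb).mp hc)), if_neg hs]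

-- infix of a snoc is an infix of the front or a suffix of the whole
theorem infix_snoc (bombL st : List Char) (c : Char)
    (h1 : ¬ bombL <:+: st) (h2 : ¬ bombL <:+ st ++ [c]) : ¬ bombL <:+: st ++ [c] := by
  rintro ⟨p, q, hpq⟩
  cases q using List.reverseRecOn with
  | nil => exact h2 ⟨p, by simpa using hpq⟩
  | append_singleton q' d _ =>
      apply h1
      have : (p ++ bombL ++ q') ++ [d] = st ++ [c] := by simpa [List.append_assoc] using hpq
      exact ⟨p, q', by simpa using List.append_inj_left' this rfl⟩

-- a bomb-free stack has no bomb occurrence starting strictly inside the popped prefix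
theorem no_early_occurrence (bombL st' rest : List Char) (c : Char) (st : List Char)
    (hst : st ++ [c] = st' ++ bombL) (hfree : ¬ bombL <:+: st)
    (j : Nat) (hj : j < st'.length) : ¬ bombL <+: (st' ++ bombL ++ rest).drop j := by
  intro hpre
  apply hfree
  have hlen : st.length + 1 = st'.length + bombL.length := by
    have := congrArg List.length hst; simpa using this
  have hjm : j + bombL.length ≤ st.length := by omega
  have htk : List.take bombL.length ((st' ++ bombL ++ rest).drop j) = bombL :=
    (List.prefix_iff_eq_take.mp hpre).symm
  have hinfix : bombL <:+: (st' ++ bombL ++ rest).take (j + bombL.length) := by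
    rw [List.take_add, htk]
    exact (List.suffix_append _ _).isInfix
  have heq : (st' ++ bombL ++ rest).take (j + bombL.length) = st.take (j + bombL.length) := by
    have h1 : (st' ++ bombL ++ rest).take (j + bombL.length)
        = (st' ++ bombL).take (j + bombL.length) := by
      rw [List.take_append_of_le_length (by simp; omega)]
    have h2 : (st ++ [c]).take (j + bombL.length) = st.take (j + bombL.length) := by
      rw [List.take_append_of_le_length hjm]
    rw [h1, ← hst, h2]
  exact (heq ▸ hinfix).trans (List.take_prefix _ _).isInfix

-- B's find lands exactly on that leftmost occurrence
theorem find_at (bombL st' rest : List Char)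
    (hno : ∀ j, j < st'.length → ¬ bombL <+: (st' ++ bombL ++ rest).drop j) :
    PySem.Chars.find (st' ++ bombL ++ rest) bombL = (st'.length : Int) := by
  set s := st' ++ bombL ++ rest with hsdef
  have hinf : bombL <:+: s := ⟨st', rest, rfl⟩
  have hne : PySem.Chars.find s bombL ≠ -1 := (PySem.Chars.find_ne_neg_one_iff s bombL).mpr hinf
  have hspec := PySem.Chars.findFrom_natCast_spec s bombL 0 (Nat.zero_le _)
    (by rw [Nat.cast_zero, PySem.Chars.findFrom_zero]; exact hne)
  rw [Nat.cast_zero, PySem.Chars.findFrom_zero] at hspec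
  obtain ⟨hge, hpre, hmin⟩ := hspec
  have hat : bombL <+: s.drop st'.length := by
    rw [hsdef, List.append_assoc, List.drop_left]
    exact ⟨rest, rfl⟩
  have hle : (PySem.Chars.find s bombL).toNat ≤ st'.length := by
    by_contra hlt
    exact hmin st'.length (Nat.zero_le _) (by omega) hat
  have hge' : st'.length ≤ (PySem.Chars.find s bombL).toNat := by
    by_contra hlt
    exact hno _ (by omega) hpre
  omega

-- after a splice the string is strictly shorter (bombL ≠ [])
theorem find_step_len (bombL s : List Char)
    (hne : PySem.Chars.find s bombL ≠ -1) :
    (PySem.List.slice s none (some (PySem.Chars.find s bombL))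
      ++ PySem.List.slice s (some (PySem.Chars.find s bombL + (bombL.length : Int))) none).length
      = s.length - bombL.length ∧ bombL.length ≤ s.length - (PySem.Chars.find s bombL).toNat := by
  have hspec := PySem.Chars.findFrom_natCast_spec s bombL 0 (Nat.zero_le _)
    (by rw [Nat.cast_zero, PySem.Chars.findFrom_zero]; exact hne)
  rw [Nat.cast_zero, PySem.Chars.findFrom_zero] at hspec
  obtain ⟨hge, hpre, -⟩ := hspec
  have hlen := hpre.length_le
  rw [List.length_drop] at hlen
  have h0 : (0:Int) ≤ PySem.Chars.find s bombL := hge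
  constructor
  · rw [PySem.List.slice_to s h0, PySem.List.slice_from s (by positivity)]
    simp only [List.length_append, List.length_take, List.length_drop]
    have : (PySem.Chars.find s bombL + (bombL.length : Int)).toNat
        = (PySem.Chars.find s bombL).toNat + bombL.length := by omega
    rw [this]
    omega
  · exact hlen

-- fuel irrelevance for B's loop, as long as fuel exceeds the string length
theorem explodeFind_fuel (bombL : List Char) (hb : bombL ≠ []) :
    ∀ n s f1 f2, s.length ≤ n → s.length < f1 → s.length < f2 →
      explodeFind bombL f1 s = explodeFind bombL f2 s := by
  intro n
  induction n with
  | zero =>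
      intro s f1 f2 hn h1 h2
      obtain ⟨g1, rfl⟩ : ∃ g, f1 = g + 1 := ⟨f1 - 1, by omega⟩
      obtain ⟨g2, rfl⟩ : ∃ g, f2 = g + 1 := ⟨f2 - 1, by omega⟩
      have hs : s = [] := List.length_eq_zero_iff.mp (by omega)
      subst hs
      rw [explodeFind, explodeFind]
      have : PySem.Chars.find [] bombL = -1 :=
        (PySem.Chars.find_eq_neg_one_iff [] bombL).mpr
          (fun h => hb (List.eq_nil_of_infix_nil h))
      simp [this]
  | succ n ih =>
      intro s f1 f2 hn h1 h2
      obtain ⟨g1, rfl⟩ : ∃ g, f1 = g + 1 := ⟨f1 - 1, by omega⟩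
      obtain ⟨g2, rfl⟩ : ∃ g, f2 = g + 1 := ⟨f2 - 1, by omega⟩
      rw [explodeFind, explodeFind]
      by_cases hfind : PySem.Chars.find s bombL = -1
      · simp [hfind]
      · simp only [hfind, if_false]
        obtain ⟨hlen, hup⟩ := find_step_len bombL s hfind
        have hbl : 1 ≤ bombL.length := by
          simpa [Nat.one_le_iff_ne_zero, List.length_eq_zero_iff] using hb
        exact ih _ g1 g2 (by omega) (by omega) (by omega)

-- the main invariant: with a bomb-free stack, A's scan equals B's repeated splice
theorem main_invariant (bombL : List Char) (hb : bombL ≠ []) :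
    ∀ rest st, ¬ bombL <:+: st →
      explodeOuter bombL bombL.length rest st
        = explodeFind bombL ((st ++ rest).length + 1) (st ++ rest) := by
  intro rest
  induction rest with
  | nil =>
      intro st hfree
      simp only [List.append_nil, explodeOuter, explodeFind]
      rw [(PySem.Chars.find_eq_neg_one_iff st bombL).mpr hfree]
      simp
  | cons c rest ih =>
      intro st hfree
      rw [explodeOuter]
      have hbl : 1 ≤ bombL.length := by
        simpa [Nat.one_le_iff_ne_zero, List.length_eq_zero_iff] using hb
      by_cases hsuf : bombL <:+ st ++ [c]
      · -- the pushed char completes an occurrence of bomb: A pops it, B splices it out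
        have htake : (st ++ [c]).take ((st ++ [c]).length - bombL.length) <+: st := by
          have h1 : (st ++ [c]).length - bombL.length ≤ st.length := by simp; omega
          rw [List.take_append_of_le_length h1]
          exact List.take_prefix _ _
        have hfree' : ¬ bombL <:+: (st ++ [c]).take ((st ++ [c]).length - bombL.length) :=
          fun h => hfree (h.trans htake.isInfix)
        rw [inner_eq bombL hb _ _ (by omega) hfree', if_pos hsuf]
        set st' := (st ++ [c]).take ((st ++ [c]).length - bombL.length) with hst'
        have hsplit : st ++ [c] = st' ++ bombL := by
          have hd := List.suffix_iff_eq_drop.mp hsuf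
          calc st ++ [c] = st' ++ (st ++ [c]).drop ((st ++ [c]).length - bombL.length) :=
                (List.take_append_drop _ _).symm
            _ = st' ++ bombL := by rw [← hd]
        have hkey : st ++ c :: rest = st' ++ bombL ++ rest := by
          rw [show st ++ c :: rest = (st ++ [c]) ++ rest by simp, hsplit]
        rw [ih st' hfree', hkey]
        conv_rhs => rw [explodeFind]
        have hfind := find_at bombL st' rest
          (fun j hj => no_early_occurrence bombL st' rest c st hsplit hfree j hj)
        rw [hfind, if_neg (by omega)]
        have hs1 : PySem.List.slice (st' ++ bombL ++ rest) none (some (st'.length : Int)) = st' := by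
          rw [PySem.List.slice_to _ (by positivity)]
          rw [Int.toNat_natCast, List.append_assoc, List.take_left]
        have hs2 : PySem.List.slice (st' ++ bombL ++ rest)
            (some ((st'.length : Int) + (bombL.length : Int))) none = rest := by
          rw [PySem.List.slice_from _ (by positivity)]
          have h1 : ((st'.length : Int) + (bombL.length : Int)).toNat
              = (st' ++ bombL).length := by simp only [List.length_append]; omega
          rw [h1, List.drop_left]
        rw [hs1, hs2]
        apply explodeFind_fuel bombL hb (st' ++ rest).length
        · exact le_rfl
        · omega
        · simp only [List.length_append]; omega
      · -- no occurrence completed: the stack just grows by c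
        have hfree1 : ¬ bombL <:+: st ++ [c] := infix_snoc bombL st c hfree hsuf
        have hfree' : ¬ bombL <:+: (st ++ [c]).take ((st ++ [c]).length - bombL.length) :=
          fun h => hfree1 (h.trans (List.take_prefix _ _).isInfix)
        rw [inner_eq bombL hb _ _ (by omega) hfree', if_neg hsuf]
        rw [ih (st ++ [c]) hfree1]
        rw [show st ++ c :: rest = (st ++ [c]) ++ rest by simp]

theorem bomb_empty_outer (rest st : List Char) :
    explodeOuter [] 0 rest st = st ++ rest := by
  induction rest generalizing st with
  | nil => simp [explodeOuter]
  | cons c rest ih =>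
      rw [explodeOuter, explodeInner]
      rw [if_neg, ih]
      · simp
      · rintro ⟨-, h⟩
        rw [show (-(0:Nat) : Int) = 0 by simp, PySem.List.slice_from _ le_rfl] at h
        simp at h

-- ===== VERDICT (by name: the statement is the Claim_ definition above) =====
theorem explode_text_spec : Claim_equal_explode_text := by
  intro text bomb _
  unfold Spec_explode_text explode_text explode_text_alt
  by_cases hb : bomb.toList = []
  · simp only [hb]
    rw [show ([] : List Char).length = 0 from rfl, bomb_empty_outer]
    simp
  · simp only [if_neg hb]
    rw [main_invariant bomb.toList hb text.toList []
      (fun h => hb (List.eq_nil_of_infix_nil h))]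
    simp
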